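-- pv_equiv track=rewrite | github.com/KlemensBarfus/WRF | WRF_read_write_namelist_wps.py | namelist_formatting
-- ===== SOURCE A (Python) =====
-- def namelist_formatting(key):
--   # used to generate a nice fornmatting of several keys defined in "t"
--   # result is padded by blanks up to the length of the longest key in each
--   # inner list
--   # written by K.Barfus 4/2022
--   t = [
--    ["parent_id", "parent_grid_ratio", "i_parent_start", "j_parent_start",
--     "e_we", "e_sn", "geog_data_res"],
--    ["ref_lat", "ref_lon", "truelat1", "truelat2", "stand_lon"]
--   ]
--   i = 0
--   found = False
--   res_string = key
--   while(found == False and i < len(t)):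
--     if(key in t[i]):
--       found = True
--       max_length = 0
--       for tt in t[i]:
--         if(len(tt) > max_length):
--           max_length = len(tt)
--       res_string = key.ljust(max_length)
--     else:
--       i = i + 1
--   return res_string
-- ===== SOURCE B (Python) =====
-- def namelist_formatting(key):
--   # Table-driven: precompute each key's target width once, then one lookup.
--   # Unknown keys default to their own length, so ljust is a no-op on them.
--   t = [
--    ["parent_id", "parent_grid_ratio", "i_parent_start", "j_parent_start",
--     "e_we", "e_sn", "geog_data_res"],
--    ["ref_lat", "ref_lon", "truelat1", "truelat2", "stand_lon"]
--   ]
--   widths = {k: max(len(x) for x in group) for group in t for k in group}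
--   return key.ljust(widths.get(key, len(key)))
-- ===== Notes on version B (the rewrite author's own statement) =====
-- stated objective: simpler
-- what changed: Replaces the explicit found-flag while-loop with group search and an inner max-finding loop by a precomputed key->width dictionary built in one comprehension plus a single lookup with len(key) as default, so no search or max loop runs per call.
import Mathlib
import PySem

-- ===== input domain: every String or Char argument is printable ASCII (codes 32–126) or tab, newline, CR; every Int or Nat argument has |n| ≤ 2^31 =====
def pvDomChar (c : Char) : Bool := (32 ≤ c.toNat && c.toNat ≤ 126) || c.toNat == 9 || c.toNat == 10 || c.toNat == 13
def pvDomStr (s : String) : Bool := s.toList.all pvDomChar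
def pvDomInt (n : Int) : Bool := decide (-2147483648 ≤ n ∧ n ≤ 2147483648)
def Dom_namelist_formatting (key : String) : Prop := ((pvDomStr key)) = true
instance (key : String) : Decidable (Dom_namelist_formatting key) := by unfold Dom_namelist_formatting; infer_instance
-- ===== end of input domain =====

-- B replaces A's search-and-max while-loop by a precomputed key->width table and one lookup (simpler).

-- ===== PORT A =====
-- the constant table t of A
def pvGroupsA : List (List String) :=
  [["parent_id", "parent_grid_ratio", "i_parent_start", "j_parent_start",
    "e_we", "e_sn", "geog_data_res"],
   ["ref_lat", "ref_lon", "truelat1", "truelat2", "stand_lon"]]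

-- str.ljust ported by hand (exact for any width: pads with spaces on the right, no-op if width ≤ len)
def pvLjust (s : String) (w : Nat) : String :=
  String.ofList (s.toList ++ List.replicate (w - s.toList.length) ' ')

-- A's while-loop: advance i until found or i = len(t); res_string starts as key
def pvLoopA (key : String) (groups : List (List String)) (res : String) : String :=
  match groups with
  | [] => res
  | g :: rest =>
    if key ∈ g then
      -- found = True; inner for-loop computing max_length
      let maxLength := g.foldl (fun m tt => if tt.toList.length > m then tt.toList.length else m) 0
      pvLjust key maxLength
    else
      pvLoopA key rest res

def namelist_formatting (key : String) : String :=
  pvLoopA key pvGroupsA key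

-- ===== PORT B =====
-- max(len(x) for x in group); groups are non-empty literals, 0 default is unreachable
def pvMaxLen (g : List String) : Int :=
  (PySem.List.max? (g.map (fun x => (x.toList.length : Int))) (fun y => y)).getD 0

-- widths = {k: max(len(x) for x in group) for group in t for k in group}
def pvWidths : PySem.Dict String Int :=
  pvGroupsA.foldl (fun d g => g.foldl (fun d k => d.insert k (pvMaxLen g)) d) PySem.Dict.empty

def namelist_formatting_alt (key : String) : String :=
  pvLjust key ((pvWidths.getD key (key.toList.length : Int)).toNat)

-- ===== PRECONDITION & SPEC =====
def Spec_namelist_formatting (key : String) (out : String) : Prop := out = namelist_formatting_alt key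
instance (key : String) (out : String) : Decidable (Spec_namelist_formatting key out) := by unfold Spec_namelist_formatting; infer_instance

-- ===== CLAIM (what is proved, stated in full; the proofs are below) =====
def Claim_equal_namelist_formatting : Prop := ∀ (key : String), Dom_namelist_formatting key → Spec_namelist_formatting key (namelist_formatting key)

-- ===== LEMMAS AND PROOFS =====

-- a key in neither group is returned unchanged by both ports
theorem pv_unknown (key : String)
    (h1 : key ∉ pvGroupsA[0]!) (h2 : key ∉ pvGroupsA[1]!) :
    namelist_formatting key = namelist_formatting_alt key := by
  simp only [pvGroupsA, List.getElem!_cons_zero, List.getElem!_cons_succ,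
    List.mem_cons, List.not_mem_nil, or_false, not_or] at h1 h2
  obtain ⟨a1,a2,a3,a4,a5,a6,a7⟩ := h1
  obtain ⟨b1,b2,b3,b4,b5⟩ := h2
  have hA : namelist_formatting key = key := by
    simp [namelist_formatting, pvGroupsA, pvLoopA, a1,a2,a3,a4,a5,a6,a7,b1,b2,b3,b4,b5]
  have hB : namelist_formatting_alt key = key := by
    simp only [namelist_formatting_alt, pvWidths, pvGroupsA, List.foldl,
      PySem.Dict.getD_insert, a1,a2,a3,a4,a5,a6,a7,b1,b2,b3,b4,b5, if_false,
      PySem.Dict.getD_empty]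
    simp [pvLjust, Int.toNat_natCast]
  rw [hA, hB]

-- ===== VERDICT (by name: the statement is the Claim_ definition above) =====
theorem namelist_formatting_spec : Claim_equal_namelist_formatting := by
  intro key _
  unfold Spec_namelist_formatting
  by_cases h1 : key ∈ pvGroupsA[0]!
  · simp only [pvGroupsA, List.getElem!_cons_zero, List.mem_cons] at h1
    rcases h1 with h|h|h|h|h|h|h|h <;> first | (subst h; decide) | simp at h
  · by_cases h2 : key ∈ pvGroupsA[1]!
    · simp only [pvGroupsA, List.getElem!_cons_zero, List.getElem!_cons_succ,
        List.mem_cons] at h2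
      rcases h2 with h|h|h|h|h|h <;> first | (subst h; decide) | simp at h
    · exact pv_unknown key h1 h2
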